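-- pv_equiv track=rewrite | github.com/MYousafZahir/ocr-screenshot | Sources/ocr-screenshot/Resources/danube_postprocess.py | _choose_gguf
-- ===== SOURCE A (Python) =====
-- def _choose_gguf(files, require_q4: bool):
--     ggufs = [f for f in files if f.endswith(".gguf")]
--     if not ggufs:
--         return ""
--     preferred = [
--         "Q4_K_M",
--         "Q4_K",
--         "Q4",
--         "q4",
--     ]
--     for tag in preferred:
--         for name in ggufs:
--             if tag in name:
--                 return name
--     if require_q4:
--         return ""
--     return ggufs[0]
-- ===== SOURCE B (Python) =====
-- _PREFERRED = ("Q4_K_M", "Q4_K", "Q4", "q4")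
--
--
-- def _prio(name):
--     """Index of the first preferred tag contained in name, len(_PREFERRED) if none."""
--     return next((i for i, tag in enumerate(_PREFERRED) if tag in name), len(_PREFERRED))
--
--
-- def _choose_gguf(files, require_q4: bool):
--     ggufs = [f for f in files if f.endswith(".gguf")]
--     if not ggufs:
--         return ""
--     best = min(ggufs, key=_prio)  # min is stable: first file in list order wins ties
--     if _prio(best) < len(_PREFERRED):
--         return best
--     return "" if require_q4 else ggufs[0]
-- ===== Notes on version B (the rewrite author's own statement) =====
-- stated objective: alternative
-- what changed: Replaces the nested tag-then-file early-return scan with a per-file priority score (index of first matching preferred tag) and a single stable min over the files, mapping a no-match score to the ''/first-file fallback.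
import Mathlib
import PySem

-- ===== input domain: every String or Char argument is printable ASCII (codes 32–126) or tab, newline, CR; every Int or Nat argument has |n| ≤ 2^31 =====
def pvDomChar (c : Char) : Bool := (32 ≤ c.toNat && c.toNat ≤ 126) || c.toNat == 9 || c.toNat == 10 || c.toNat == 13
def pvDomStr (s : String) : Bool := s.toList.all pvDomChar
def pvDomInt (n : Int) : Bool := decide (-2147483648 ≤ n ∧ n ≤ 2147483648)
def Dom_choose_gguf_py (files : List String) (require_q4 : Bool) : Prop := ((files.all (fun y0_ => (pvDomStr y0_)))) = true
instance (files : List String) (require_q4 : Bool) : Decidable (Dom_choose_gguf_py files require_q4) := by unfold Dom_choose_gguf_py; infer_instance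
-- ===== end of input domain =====

-- B replaces A's nested tag-then-file early-return scan with a per-file priority score
-- and one stable minimum selection (objective: alternative decomposition, same cost).


-- ===== PORT A =====
-- the fixed preferred-tag list (shared literal of both sources)
def preferredTags : List String := ["Q4_K_M", "Q4_K", "Q4", "q4"]

-- A's nested loops: for tag in preferred: for name in ggufs: if tag in name: return name
def tagLoop (tags : List String) (ggufs : List String) : Option String :=
  match tags with
  | [] => none
  | t :: ts =>
    match ggufs.find? (fun name => PySem.Str.isIn t name) with
    | some n => some n
    | none => tagLoop ts ggufs

def choose_gguf_py (files : List String) (require_q4 : Bool) : String :=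
  let ggufs := files.filter (fun f => PySem.Str.endswith f ".gguf")
  if ggufs.isEmpty then ""
  else
    match tagLoop preferredTags ggufs with
    | some n => n
    | none => if require_q4 then "" else ggufs.headD ""  -- ggufs[0]; ggufs nonempty here

-- ===== PORT B =====
-- _prio(name): index of the first preferred tag contained in name, else len(_PREFERRED)
def prioB (tags : List String) (name : String) : Nat :=
  match tags with
  | [] => 0
  | t :: ts => if PySem.Str.isIn t name then 0 else prioB ts name + 1

def choose_gguf_py_alt (files : List String) (require_q4 : Bool) : String :=
  let ggufs := files.filter (fun f => PySem.Str.endswith f ".gguf")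
  match ggufs with
  | [] => ""
  | g :: gs =>
    -- best = min(ggufs, key=prio); min? is some on a nonempty list, getD g is unreachable
    let best := (PySem.List.min? (g :: gs) (prioB preferredTags)).getD g
    if prioB preferredTags best < preferredTags.length then best
    else if require_q4 then "" else g

-- ===== PRECONDITION & SPEC =====
def Spec_choose_gguf_py (files : List String) (require_q4 : Bool) (out : String) : Prop := out = choose_gguf_py_alt files require_q4
instance (files : List String) (require_q4 : Bool) (out : String) : Decidable (Spec_choose_gguf_py files require_q4 out) := by unfold Spec_choose_gguf_py; infer_instance

-- ===== CLAIM (what is proved, stated in full; the proofs are below) =====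
def Claim_equal_choose_gguf_py : Prop := ∀ (files : List String) (require_q4 : Bool), Dom_choose_gguf_py files require_q4 → Spec_choose_gguf_py files require_q4 (choose_gguf_py files require_q4)

-- ===== LEMMAS AND PROOFS =====

-- the plain stable-min fold (proof-side view of PySem.List.min? on a nonempty list)
def foldMin (f : String → Nat) (b : String) (l : List String) : String :=
  l.foldl (fun best n => if f n < f best then n else best) b

theorem min?_cons_eq_foldMin (f : String → Nat) (g : String) (gs : List String) :
    PySem.List.min? (g :: gs) f = some (foldMin f g gs) := by
  induction gs generalizing g with
  | nil => rfl
  | cons x xs ih =>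
    have h1 : PySem.List.min? (g :: x :: xs) f =
        PySem.List.min? ((if f x < f g then x else g) :: xs) f := by
      simp only [PySem.List.min?, List.foldl_cons]
      by_cases hx : f x < f g <;> simp [hx]
    rw [h1, ih]
    simp only [foldMin, List.foldl_cons]

theorem foldMin_mem (f : String → Nat) (b : String) (l : List String) :
    foldMin f b l ∈ b :: l := by
  induction l generalizing b with
  | nil => simp [foldMin]
  | cons x xs ih =>
    simp only [foldMin, List.foldl_cons]
    by_cases hx : f x < f b
    · rw [if_pos hx]
      have := ih x
      simp only [List.mem_cons] at this ⊢
      tauto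
    · rw [if_neg hx]
      have := ih b
      simp only [List.mem_cons] at this ⊢
      tauto

theorem foldMin_of_zero (f : String → Nat) (b : String) (l : List String) (hb : f b = 0) :
    foldMin f b l = b := by
  induction l with
  | nil => rfl
  | cons x xs ih => simp [foldMin, List.foldl_cons, hb] at ih ⊢; simpa [hb] using ih

theorem foldMin_find?_zero (f : String → Nat) (l : List String) (b : String) (m : String)
    (h : (b :: l).find? (fun x => f x == 0) = some m) : foldMin f b l = m := by
  induction l generalizing b with
  | nil =>
    cases hfb : (f b == 0 : Bool) with
    | true =>
      have hm : b = m := by simpa [List.find?, hfb] using h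
      simpa [foldMin] using hm
    | false => simp [List.find?, hfb] at h
  | cons x xs ih =>
    by_cases hb : f b = 0
    · have hfb : (f b == 0 : Bool) = true := by simp [hb]
      have hm : b = m := by simpa [List.find?, hfb] using h
      rw [← hm]
      exact foldMin_of_zero f b (x :: xs) hb
    · have hfb : (f b == 0 : Bool) = false := by simp [hb]
      have hstep : foldMin f b (x :: xs) = foldMin f (if f x < f b then x else b) xs := by
        simp [foldMin, List.foldl_cons]
      rw [hstep]
      have hfind : (x :: xs).find? (fun x => f x == 0) = some m := by
        simpa [List.find?, hfb] using h
      by_cases hx : f x = 0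
      · have hfx : (f x == 0 : Bool) = true := by simp [hx]
        have hm : x = m := by simpa [List.find?, hfx] using hfind
        have hlt : f x < f b := by omega
        rw [if_pos hlt, ← hm]
        exact foldMin_of_zero f x xs hx
      · have hfx : (f x == 0 : Bool) = false := by simp [hx]
        have hfind' : xs.find? (fun x => f x == 0) = some m := by
          simpa [List.find?, hfx] using hfind
        apply ih
        by_cases hlt : f x < f b
        · rw [if_pos hlt]; simpa [List.find?, hfx] using hfind'
        · rw [if_neg hlt]; simpa [List.find?, hfb] using hfind'

theorem foldMin_congr (f g : String → Nat) (b : String) (l : List String)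
    (h : ∀ x ∈ b :: l, f x = g x) : foldMin f b l = foldMin g b l := by
  induction l generalizing b with
  | nil => rfl
  | cons x xs ih =>
    have hb : f b = g b := h b (by simp)
    have hx : f x = g x := h x (by simp)
    simp only [foldMin, List.foldl_cons]
    rw [hb, hx]
    by_cases hlt : g x < g b
    · simp only [if_pos hlt]
      exact ih x (fun y hy => h y (by simp only [List.mem_cons] at hy ⊢; tauto))
    · simp only [if_neg hlt]
      exact ih b (fun y hy => h y (by simp only [List.mem_cons] at hy ⊢; tauto))

theorem foldMin_succ (f : String → Nat) (b : String) (l : List String) :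
    foldMin (fun x => f x + 1) b l = foldMin f b l := by
  unfold foldMin
  congr 1
  funext best n
  simp

-- a priority never exceeds the number of tags
theorem prioB_le (tags : List String) (x : String) : prioB tags x ≤ tags.length := by
  induction tags with
  | nil => simp [prioB]
  | cons t ts ih =>
    by_cases h : PySem.Chars.isIn t.toList x.toList = true <;> simp [prioB, h] <;> try omega

-- main bridge: A's tag loop (with fallback F) equals B's min-by-priority selection
theorem tagLoop_eq_min (tags : List String) (g : String) (gs : List String) (F : String) :
    (match tagLoop tags (g :: gs) with
     | some n => n
     | none => F) =
    (if prioB tags (foldMin (prioB tags) g gs) = tags.length then F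
     else foldMin (prioB tags) g gs) := by
  induction tags with
  | nil =>
    have hz : ∀ x, prioB [] x = 0 := fun _ => rfl
    simp [tagLoop, hz, foldMin_of_zero]
  | cons t ts ih =>
    cases hfind : (g :: gs).find? (fun name => PySem.Str.isIn t name) with
    | some n =>
      have hn : PySem.Str.isIn t n = true := List.find?_some hfind
      have hn' : PySem.Chars.isIn t.toList n.toList = true := by simpa using hn
      have hpn : prioB (t :: ts) n = 0 := by simp [prioB, hn']
      have hfold : foldMin (prioB (t :: ts)) g gs = n := by
        apply foldMin_find?_zero
        have hpred : (fun x => (prioB (t :: ts) x == 0 : Bool)) =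
            (fun name => PySem.Str.isIn t name) := by
          funext x
          by_cases hx : PySem.Str.isIn t x = true
          · have hx' : PySem.Chars.isIn t.toList x.toList = true := by simpa using hx
            simp [prioB, hx']
          · rw [Bool.not_eq_true] at hx
            have hx' : PySem.Chars.isIn t.toList x.toList = false := by simpa using hx
            simp [prioB, hx']
        rw [hpred]
        exact hfind
      simp only [tagLoop, hfind, hfold, hpn, List.length_cons]
      simp
    | none =>
      have hnone : ∀ x ∈ g :: gs, PySem.Chars.isIn t.toList x.toList = false := by
        intro x hx
        have h1 := List.find?_eq_none.mp hfind x hx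
        rw [Bool.not_eq_true] at h1
        simpa using h1
      have hcongr : foldMin (prioB (t :: ts)) g gs = foldMin (prioB ts) g gs := by
        rw [foldMin_congr (prioB (t :: ts)) (fun x => prioB ts x + 1) g gs
            (fun x hx => by simp [prioB, hnone x hx])]
        exact foldMin_succ (prioB ts) g gs
      have hmem := foldMin_mem (prioB ts) g gs
      have hbest : prioB (t :: ts) (foldMin (prioB ts) g gs) =
          prioB ts (foldMin (prioB ts) g gs) + 1 := by
        simp [prioB, hnone _ hmem]
      simp only [tagLoop, hfind, hcongr, hbest, List.length_cons, Nat.add_left_inj]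
      exact ih

-- ===== VERDICT (by name: the statement is the Claim_ definition above) =====
theorem choose_gguf_py_spec : Claim_equal_choose_gguf_py := by
  intro files require_q4 _
  show choose_gguf_py files require_q4 = choose_gguf_py_alt files require_q4
  unfold choose_gguf_py choose_gguf_py_alt
  cases hg : files.filter (fun f => PySem.Str.endswith f ".gguf") with
  | nil => simp
  | cons g gs =>
    simp only [List.isEmpty_cons, Bool.false_eq_true, if_false, List.headD_cons,
      min?_cons_eq_foldMin, Option.getD_some]
    rw [tagLoop_eq_min preferredTags g gs _]
    have hle := prioB_le preferredTags (foldMin (prioB preferredTags) g gs)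
    by_cases hp : prioB preferredTags (foldMin (prioB preferredTags) g gs) = preferredTags.length
    · have hlt : ¬ prioB preferredTags (foldMin (prioB preferredTags) g gs) <
          preferredTags.length := by omega
      simp [hp, hlt]
    · have hlt : prioB preferredTags (foldMin (prioB preferredTags) g gs) <
          preferredTags.length := by omega
      simp [hp, hlt]
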